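-- pv_equiv track=rewrite | github.com/DIOL-UniTN/MOE-VFFF | src/utils/weight_virtualization.py | is_both_matched_different
-- ===== SOURCE A (Python) =====
-- def is_both_matched_different(wp_indices, all_virtualpage_matches):
--     for vp_idx, cur_virtualpage_matches in enumerate(all_virtualpage_matches):
--         first_matched, second_matched = wp_indices[0] in cur_virtualpage_matches, wp_indices[1] in cur_virtualpage_matches
--         if first_matched and second_matched:
--             return False
--         elif first_matched and is_matched(wp_indices[1], all_virtualpage_matches):
--             return True
--         elif second_matched and is_matched(wp_indices[0], all_virtualpage_matches):
--             return True
--     return False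
--
-- def is_matched(wp_id:int, all_virtualpage_matches):
--     for vp_idx, cur_virtualpage_matches in enumerate(all_virtualpage_matches):
--         matched = wp_id in cur_virtualpage_matches
--         if matched:
--             return True
--     return False
-- ===== SOURCE B (Python) =====
-- def is_both_matched_different(wp_indices, all_virtualpage_matches):
--     if not all_virtualpage_matches:
--         return False
--     a, b = wp_indices[0], wp_indices[1]
--     a_found = b_found = False
--     first_colocated = None  # at the first page containing a or b: were both there?
--     for page in all_virtualpage_matches:
--         in_a, in_b = a in page, b in page
--         if first_colocated is None and (in_a or in_b):
--             first_colocated = in_a and in_b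
--         a_found = a_found or in_a
--         b_found = b_found or in_b
--     return a_found and b_found and not first_colocated
-- ===== Notes on version B (the rewrite author's own statement) =====
-- stated objective: alternative
-- what changed: A rescans the whole page list via is_matched inside its loop; B makes a single pass that tracks whether each of the two indices is matched anywhere and whether the first page containing either held both, then combines the three flags.
import Mathlib
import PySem

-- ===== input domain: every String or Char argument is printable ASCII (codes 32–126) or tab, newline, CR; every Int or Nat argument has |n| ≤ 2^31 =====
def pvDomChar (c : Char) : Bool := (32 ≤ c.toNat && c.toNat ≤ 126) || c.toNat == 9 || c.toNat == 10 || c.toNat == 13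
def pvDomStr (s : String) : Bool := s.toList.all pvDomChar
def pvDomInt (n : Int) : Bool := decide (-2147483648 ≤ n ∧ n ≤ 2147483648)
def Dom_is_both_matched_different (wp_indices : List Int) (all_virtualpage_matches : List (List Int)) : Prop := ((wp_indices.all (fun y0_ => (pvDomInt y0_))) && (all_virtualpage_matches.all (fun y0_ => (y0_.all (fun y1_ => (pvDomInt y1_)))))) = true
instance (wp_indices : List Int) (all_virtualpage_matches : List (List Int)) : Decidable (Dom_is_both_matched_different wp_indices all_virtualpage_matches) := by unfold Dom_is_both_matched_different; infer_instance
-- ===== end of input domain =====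

-- B replaces A's loop-with-rescans (is_matched rescans all pages inside the loop) by ONE pass that
-- tracks whether each index was ever matched and whether the first page containing either held both.

-- ===== PORT A =====
def is_matched (wp_id : Int) (all_virtualpage_matches : List (List Int)) : Bool :=
  match all_virtualpage_matches with
  | [] => false
  | cur :: rest => if cur.contains wp_id then true else is_matched wp_id rest

-- A's main loop; `all` is the full page list (used by the is_matched calls), `rem` the remaining pages.
-- wp_indices[0]/[1] are in range on every input admitted by Pre_; .getD 0 is never taken there.
def pvLoopA (wp_indices : List Int) (all rem : List (List Int)) : Bool :=
  match rem with
  | [] => false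
  | cur :: rest =>
    let first_matched := cur.contains ((PySem.List.pyGet? wp_indices 0).getD 0)
    let second_matched := cur.contains ((PySem.List.pyGet? wp_indices 1).getD 0)
    if first_matched && second_matched then false
    else if first_matched && is_matched ((PySem.List.pyGet? wp_indices 1).getD 0) all then true
    else if second_matched && is_matched ((PySem.List.pyGet? wp_indices 0).getD 0) all then true
    else pvLoopA wp_indices all rest

def is_both_matched_different (wp_indices : List Int) (all_virtualpage_matches : List (List Int)) : Bool :=
  pvLoopA wp_indices all_virtualpage_matches all_virtualpage_matches

-- ===== PORT B =====
-- the body of B's single for-loop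
def pvStepB (a b : Int) (st : Bool × Bool × Option Bool) (page : List Int) : Bool × Bool × Option Bool :=
  let in_a := page.contains a
  let in_b := page.contains b
  let fc := if st.2.2.isNone && (in_a || in_b) then some (in_a && in_b) else st.2.2
  (st.1 || in_a, st.2.1 || in_b, fc)

def is_both_matched_different_alt (wp_indices : List Int) (all_virtualpage_matches : List (List Int)) : Bool :=
  if all_virtualpage_matches.isEmpty then false
  else
    let a := (PySem.List.pyGet? wp_indices 0).getD 0
    let b := (PySem.List.pyGet? wp_indices 1).getD 0
    let st := all_virtualpage_matches.foldl (pvStepB a b) (false, false, none)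
    st.1 && st.2.1 && !(st.2.2.getD false)

-- ===== PRECONDITION & SPEC =====
-- A raises IndexError on wp_indices[0]/[1] exactly when the page list is nonempty and wp_indices
-- has fewer than two elements; Pre_ excludes only those crashing inputs.
def Pre_is_both_matched_different (wp_indices : List Int) (all_virtualpage_matches : List (List Int)) : Prop :=
  all_virtualpage_matches = [] ∨ 2 ≤ wp_indices.length
instance (wp_indices : List Int) (all_virtualpage_matches : List (List Int)) : Decidable (Pre_is_both_matched_different wp_indices all_virtualpage_matches) := by unfold Pre_is_both_matched_different; infer_instance

def pvWitness_is_both_matched_different : List Int × List (List Int) := ([0, 1], [[0], [1]])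

def Spec_is_both_matched_different (wp_indices : List Int) (all_virtualpage_matches : List (List Int)) (out : Bool) : Prop := out = is_both_matched_different_alt wp_indices all_virtualpage_matches
instance (wp_indices : List Int) (all_virtualpage_matches : List (List Int)) (out : Bool) : Decidable (Spec_is_both_matched_different wp_indices all_virtualpage_matches out) := by unfold Spec_is_both_matched_different; infer_instance

-- ===== CLAIM (what is proved, stated in full; the proofs are below) =====
def Claim_equal_is_both_matched_different : Prop := ∀ (wp_indices : List Int) (all_virtualpage_matches : List (List Int)), Dom_is_both_matched_different wp_indices all_virtualpage_matches → Pre_is_both_matched_different wp_indices all_virtualpage_matches → Spec_is_both_matched_different wp_indices all_virtualpage_matches (is_both_matched_different wp_indices all_virtualpage_matches)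

-- ===== LEMMAS AND PROOFS =====

-- first-colocation marker: at the first page containing a or b, whether it contained both
def pvFC (a b : Int) : List (List Int) → Option Bool
  | [] => none
  | cur :: rest => if cur.contains a || cur.contains b then some (cur.contains a && cur.contains b) else pvFC a b rest

theorem is_matched_any (w : Int) (all : List (List Int)) :
    is_matched w all = all.any (fun p => p.contains w) := by
  induction all with
  | nil => rfl
  | cons cur rest ih =>
    by_cases h : w ∈ cur <;> simp [is_matched, ih, h]

theorem pvFC_none {a b : Int} {rem : List (List Int)} (h : pvFC a b rem = none) :
    rem.any (fun p => p.contains a) = false ∧ rem.any (fun p => p.contains b) = false := by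
  induction rem with
  | nil => simp
  | cons cur rest ih =>
    by_cases hc : a ∈ cur ∨ b ∈ cur
    · simp [pvFC, hc] at h
    · push Not at hc
      have h' : pvFC a b rest = none := by simpa [pvFC, hc.1, hc.2] using h
      rcases ih h' with ⟨h1, h2⟩
      simp only [List.any_cons, h1, h2]
      simp [hc.1, hc.2]

theorem pvLoopA_eq (wp : List Int) (a b : Int)
    (ha : (PySem.List.pyGet? wp 0).getD 0 = a) (hb : (PySem.List.pyGet? wp 1).getD 0 = b)
    (all rem : List (List Int)) (hsub : ∀ p ∈ rem, p ∈ all) :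
    pvLoopA wp all rem =
      (all.any (fun p => p.contains a) && all.any (fun p => p.contains b) &&
       !((pvFC a b rem).getD true)) := by
  induction rem with
  | nil => simp [pvLoopA, pvFC]
  | cons cur rest ih =>
    have hcur : cur ∈ all := hsub cur (by simp)
    have ih' := ih (fun p hp => hsub p (List.mem_cons_of_mem _ hp))
    by_cases h1 : a ∈ cur <;> by_cases h2 : b ∈ cur
    · have hAa : ∃ x ∈ all, a ∈ x := ⟨cur, hcur, h1⟩
      have hAb : ∃ x ∈ all, b ∈ x := ⟨cur, hcur, h2⟩
      simp [pvLoopA, pvFC, List.any_eq_true, ha, hb, h1, h2, hAa, hAb]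
    · have hAa : ∃ x ∈ all, a ∈ x := ⟨cur, hcur, h1⟩
      by_cases hB : ∃ x ∈ all, b ∈ x
      · simp [pvLoopA, pvFC, is_matched_any, List.any_eq_true, ha, hb, h1, h2, hAa, hB]
      · simp [pvLoopA, pvFC, is_matched_any, List.any_eq_true, ha, hb, h1, h2, hB, ih']
    · have hAb : ∃ x ∈ all, b ∈ x := ⟨cur, hcur, h2⟩
      by_cases hA : ∃ x ∈ all, a ∈ x
      · simp [pvLoopA, pvFC, is_matched_any, List.any_eq_true, ha, hb, h1, h2, hAb, hA]
      · simp [pvLoopA, pvFC, is_matched_any, List.any_eq_true, ha, hb, h1, h2, hA, ih']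
    · simp [pvLoopA, pvFC, ha, hb, h1, h2, is_matched_any, ih']

theorem pvFoldB_eq (a b : Int) (rem : List (List Int)) (x y : Bool) (c : Option Bool) :
    rem.foldl (pvStepB a b) (x, y, c) =
      (x || rem.any (fun p => p.contains a), y || rem.any (fun p => p.contains b),
       match c with | some v => some v | none => pvFC a b rem) := by
  induction rem generalizing x y c with
  | nil => cases c <;> simp [pvFC]
  | cons cur rest ih =>
    rw [List.foldl_cons]
    cases c with
    | some v =>
      have hst : pvStepB a b (x, y, some v) cur =
          (x || cur.contains a, y || cur.contains b, some v) := by simp [pvStepB]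
      rw [hst, ih]
      simp [Bool.or_assoc]
    | none =>
      by_cases hc : a ∈ cur ∨ b ∈ cur
      · have hst : pvStepB a b (x, y, none) cur =
            (x || cur.contains a, y || cur.contains b, some (cur.contains a && cur.contains b)) := by
          simp [pvStepB, hc]
        rw [hst, ih]
        simp [pvFC, hc, Bool.or_assoc]
      · push Not at hc
        have hst : pvStepB a b (x, y, none) cur =
            (x || cur.contains a, y || cur.contains b, none) := by
          simp [pvStepB, hc.1, hc.2]
        rw [hst, ih]
        simp [pvFC, hc.1, hc.2]

-- ===== VERDICT (by name: the statement is the Claim_ definition above) =====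
theorem is_both_matched_different_spec : Claim_equal_is_both_matched_different := by
  intro wp all _ _
  unfold Spec_is_both_matched_different is_both_matched_different is_both_matched_different_alt
  cases all with
  | nil => simp [pvLoopA]
  | cons h t =>
    rw [pvLoopA_eq wp _ _ rfl rfl (h :: t) (h :: t) (fun p hp => hp)]
    simp only [List.isEmpty_cons, Bool.false_eq_true, if_false, pvFoldB_eq, Bool.false_or]
    set a := (PySem.List.pyGet? wp 0).getD 0
    set b := (PySem.List.pyGet? wp 1).getD 0
    cases hfc : pvFC a b (h :: t) with
    | none =>
      rcases pvFC_none hfc with ⟨h1, h2⟩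
      simp at h1 h2
      simp
      rintro (hh | ⟨x, hx, hax⟩)
      · exact absurd hh h1.1
      · exact absurd hax (h1.2 x hx)
    | some v => simp
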